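-- pv_equiv track=rewrite | github.com/Julesc013/dominium | src/system/reliability/reliability_engine.py | _health_by_system
-- ===== SOURCE A (Python) =====
-- from typing import Dict, Iterable, List, Mapping, Sequence
--
-- def _health_by_system(rows: object) -> Dict[str, dict]:
--     out: Dict[str, dict] = {}
--     if not isinstance(rows, list):
--         rows = []
--     for row in sorted((dict(item) for item in rows if isinstance(item, Mapping)), key=lambda item: str(item.get("system_id", ""))):
--         system_id = str(row.get("system_id", "")).strip()
--         if system_id:
--             out[system_id] = dict(row)
--     return dict((key, dict(out[key])) for key in sorted(out.keys()))
-- ===== SOURCE B (Python) =====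
-- from typing import Mapping
--
-- def _health_by_system(rows: object):
--     # One grouping-max pass (winner per stripped id = max (raw key, index)),
--     # then sort only the distinct ids; no sort of the full row list.
--     if not isinstance(rows, list):
--         rows = []
--     best = {}
--     for item in rows:
--         if not isinstance(item, Mapping):
--             continue
--         raw = str(item.get("system_id", ""))
--         sid = raw.strip()
--         if not sid:
--             continue
--         cur = best.get(sid)
--         if cur is None or cur[0] <= raw:
--             best[sid] = (raw, dict(item))
--     return {sid: dict(best[sid][1]) for sid in sorted(best)}
-- ===== Notes on version B (the rewrite author's own statement) =====
-- stated objective: alternative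
-- what changed: Instead of sorting all rows by raw system_id and overwriting into a dict (last wins), B makes one grouping pass keeping per stripped id the row with the maximal raw system_id (ties: last occurrence) and then sorts only the distinct stripped ids.
import Mathlib
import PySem

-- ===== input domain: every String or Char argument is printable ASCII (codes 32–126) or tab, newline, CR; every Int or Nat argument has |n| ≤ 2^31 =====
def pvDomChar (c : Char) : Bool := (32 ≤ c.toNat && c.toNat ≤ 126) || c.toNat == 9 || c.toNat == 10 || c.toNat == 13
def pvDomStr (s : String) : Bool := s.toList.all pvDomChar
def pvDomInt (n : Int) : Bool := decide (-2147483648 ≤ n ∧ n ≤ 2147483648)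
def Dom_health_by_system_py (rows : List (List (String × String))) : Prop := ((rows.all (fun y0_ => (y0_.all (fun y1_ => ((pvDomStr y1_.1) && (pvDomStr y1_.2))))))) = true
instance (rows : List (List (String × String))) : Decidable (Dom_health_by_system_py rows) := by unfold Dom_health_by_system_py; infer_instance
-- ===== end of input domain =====

-- B replaces A's "sort all rows, then last-wins overwrite into a dict" by a single grouping
-- pass keeping, per stripped system_id, the row with the maximal raw system_id (ties: last
-- occurrence), then sorts only the distinct ids (objective: alternative).


-- ===== PORT A =====
-- body of A's for-loop: out[system_id] = dict(row), guarded by 'if system_id:'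
-- (dict(row) / dict(out[key]) copy a dict — the identity on the value here;
--  str(...) is the identity: the looked-up values are strings)
def pvStepA (out : PySem.Dict String (PySem.Dict String String)) (row : PySem.Dict String String) : PySem.Dict String (PySem.Dict String String) :=
  let system_id := PySem.Str.strip (row.getD "system_id" "")
  if system_id ≠ "" then out.insert system_id row else out

-- the dict 'out' after A's for-loop over the row dicts sorted by raw system_id
-- (every element of the Lean input is a Mapping, so the isinstance filters keep everything)
def pvOutA (rows : List (List (String × String))) : PySem.Dict String (PySem.Dict String String) :=
  (PySem.List.sorted (rows.map (fun item => PySem.Dict.ofList item))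
    (fun item => item.getD "system_id" "")).foldl pvStepA PySem.Dict.empty

def health_by_system_py (rows : List (List (String × String))) : List (String × List (String × String)) :=
  (PySem.List.sorted (pvOutA rows).keys (fun key => key)).map
    (fun key => (key, ((pvOutA rows).getD key PySem.Dict.empty).items))

-- ===== PORT B =====
-- body of B's single pass: keep per stripped id the (raw, row) with maximal raw (ties: last wins)
def pvStepB (best : PySem.Dict String (String × PySem.Dict String String)) (item : List (String × String)) : PySem.Dict String (String × PySem.Dict String String) :=
  let d := PySem.Dict.ofList item   -- dict(item)
  let raw := d.getD "system_id" ""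
  let sid := PySem.Str.strip raw
  if sid ≠ "" then
    match best.get? sid with
    | none => best.insert sid (raw, d)
    | some cur => if cur.1 ≤ raw then best.insert sid (raw, d) else best
  else best

def pvBestB (rows : List (List (String × String))) : PySem.Dict String (String × PySem.Dict String String) :=
  rows.foldl pvStepB PySem.Dict.empty

def health_by_system_py_alt (rows : List (List (String × String))) : List (String × List (String × String)) :=
  (PySem.List.sorted (pvBestB rows).keys (fun sid => sid)).map
    (fun sid => (sid, ((pvBestB rows).getD sid ("", PySem.Dict.empty)).2.items))

-- ===== PRECONDITION & SPEC =====
def Spec_health_by_system_py (rows : List (List (String × String))) (out : List (String × List (String × String))) : Prop := out = health_by_system_py_alt rows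
instance (rows : List (List (String × String))) (out : List (String × List (String × String))) : Decidable (Spec_health_by_system_py rows out) := by unfold Spec_health_by_system_py; infer_instance

-- ===== CLAIM (what is proved, stated in full; the proofs are below) =====
def Claim_equal_health_by_system_py : Prop := ∀ (rows : List (List (String × String))), Dom_health_by_system_py rows → Spec_health_by_system_py rows (health_by_system_py rows)

-- ===== LEMMAS AND PROOFS =====

-- proof-only abbreviations: the raw and the stripped system_id of a row dict
def pvRaw (d : PySem.Dict String String) : String := d.getD "system_id" ""
def pvSid (d : PySem.Dict String String) : String := PySem.Str.strip (pvRaw d)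

-- B's per-key accumulator update (unconditional, and restricted to target key k)
def pvUpdAll (a : Option (String × PySem.Dict String String)) (d : PySem.Dict String String) : Option (String × PySem.Dict String String) :=
  some (match a with
    | none => (pvRaw d, d)
    | some c => if c.1 ≤ pvRaw d then (pvRaw d, d) else c)

def pvUpd (k : String) (a : Option (String × PySem.Dict String String)) (d : PySem.Dict String String) : Option (String × PySem.Dict String String) :=
  if pvSid d = k then pvUpdAll a d else a

-- B's step expressed on the already-converted dict
def pvStepB' (best : PySem.Dict String (String × PySem.Dict String String)) (d : PySem.Dict String String) : PySem.Dict String (String × PySem.Dict String String) :=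
  let raw := d.getD "system_id" ""
  let sid := PySem.Str.strip raw
  if sid ≠ "" then
    match best.get? sid with
    | none => best.insert sid (raw, d)
    | some cur => if cur.1 ≤ raw then best.insert sid (raw, d) else best
  else best
theorem pvStepA_get? (o : PySem.Dict String (PySem.Dict String String)) (d : PySem.Dict String String) (k : String) (hk : k ≠ "") :
    (pvStepA o d).get? k = if pvSid d = k then some d else o.get? k := by
  unfold pvStepA pvSid pvRaw
  by_cases h : PySem.Str.strip (d.getD "system_id" "") = ""
  · rw [if_neg (by simp [h]), if_neg (fun he => hk (h.symm.trans he).symm)]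
  · rw [if_pos (by simpa using h), PySem.Dict.get?_insert]
    by_cases h2 : PySem.Str.strip (d.getD "system_id" "") = k
    · rw [if_pos h2.symm, if_pos h2]
    · rw [if_neg (fun he => h2 he.symm), if_neg h2]

theorem pvStepB'_get? (b : PySem.Dict String (String × PySem.Dict String String)) (d : PySem.Dict String String) (k : String) (hk : k ≠ "") :
    (pvStepB' b d).get? k = pvUpd k (b.get? k) d := by
  unfold pvStepB' pvUpd pvUpdAll pvSid pvRaw
  by_cases h : PySem.Str.strip (d.getD "system_id" "") = ""
  · rw [if_neg (by simp [h]), if_neg (fun he => hk (h.symm.trans he).symm)]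
  · rw [if_pos (by simpa using h)]
    by_cases h2 : PySem.Str.strip (d.getD "system_id" "") = k
    · subst h2
      cases hb : b.get? (PySem.Str.strip (d.getD "system_id" "")) with
      | none => simp [PySem.Dict.get?_insert_self]
      | some cur =>
        by_cases hle : cur.1 ≤ d.getD "system_id" ""
        · simp [hle, PySem.Dict.get?_insert_self]
        · simp [hb, hle]
    · rw [if_neg h2]
      cases hb : b.get? (PySem.Str.strip (d.getD "system_id" "")) with
      | none => simp [PySem.Dict.get?_insert_of_ne _ _ (fun he => h2 he.symm)]
      | some cur =>
        by_cases hle : cur.1 ≤ d.getD "system_id" ""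
        · simp [hle, PySem.Dict.get?_insert_of_ne _ _ (fun he => h2 he.symm)]
        · simp [hle]

theorem pvA_get? (l : List (PySem.Dict String String)) (o : PySem.Dict String (PySem.Dict String String)) (k : String) (hk : k ≠ "") :
    (l.foldl pvStepA o).get? k = l.foldl (fun a d => if pvSid d = k then some d else a) (o.get? k) := by
  induction l generalizing o with
  | nil => rfl
  | cons d t ih => simp only [List.foldl_cons]; rw [ih, pvStepA_get? o d k hk]

theorem pvB_get? (l : List (PySem.Dict String String)) (b : PySem.Dict String (String × PySem.Dict String String)) (k : String) (hk : k ≠ "") :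
    (l.foldl pvStepB' b).get? k = l.foldl (pvUpd k) (b.get? k) := by
  induction l generalizing b with
  | nil => rfl
  | cons d t ih => simp only [List.foldl_cons]; rw [ih, pvStepB'_get? b d k hk]

theorem pvA_get?_empty (l : List (PySem.Dict String String)) (o : PySem.Dict String (PySem.Dict String String)) :
    (l.foldl pvStepA o).get? "" = o.get? "" := by
  induction l generalizing o with
  | nil => rfl
  | cons d t ih =>
    simp only [List.foldl_cons]; rw [ih]
    unfold pvStepA
    by_cases h : PySem.Str.strip (d.getD "system_id" "") = ""
    · simp [h]
    · simp only [h, ne_eq, not_false_iff, if_true]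
      exact PySem.Dict.get?_insert_of_ne _ _ (fun he => h he.symm)

theorem pvB_get?_empty (l : List (PySem.Dict String String)) (b : PySem.Dict String (String × PySem.Dict String String)) :
    (l.foldl pvStepB' b).get? "" = b.get? "" := by
  induction l generalizing b with
  | nil => rfl
  | cons d t ih =>
    simp only [List.foldl_cons]; rw [ih]
    unfold pvStepB'
    by_cases h : PySem.Str.strip (d.getD "system_id" "") = ""
    · simp [h]
    · simp only [h, ne_eq, not_false_iff, if_true]
      cases hb : b.get? (PySem.Str.strip (d.getD "system_id" "")) with
      | none => exact PySem.Dict.get?_insert_of_ne _ _ (fun he => h he.symm)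
      | some cur =>
        by_cases hle : cur.1 ≤ d.getD "system_id" ""
        · simp [hle, PySem.Dict.get?_insert_of_ne _ _ (fun he => h he.symm)]
        · simp [hle]

theorem pvA_nodup (l : List (PySem.Dict String String)) (o : PySem.Dict String (PySem.Dict String String)) (h : o.keys.Nodup) :
    (l.foldl pvStepA o).keys.Nodup := by
  induction l generalizing o with
  | nil => exact h
  | cons d t ih =>
    simp only [List.foldl_cons]
    apply ih
    unfold pvStepA
    by_cases h0 : PySem.Str.strip (d.getD "system_id" "") = ""
    · simpa [h0] using h
    · simp only [h0, ne_eq, not_false_iff, if_true]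
      exact PySem.Dict.nodup_keys_insert _ _ _ h

theorem pvB_nodup (l : List (PySem.Dict String String)) (b : PySem.Dict String (String × PySem.Dict String String)) (h : b.keys.Nodup) :
    (l.foldl pvStepB' b).keys.Nodup := by
  induction l generalizing b with
  | nil => exact h
  | cons d t ih =>
    simp only [List.foldl_cons]
    apply ih
    unfold pvStepB'
    by_cases h0 : PySem.Str.strip (d.getD "system_id" "") = ""
    · simpa [h0] using h
    · simp only [h0, ne_eq, not_false_iff, if_true]
      cases hb : b.get? (PySem.Str.strip (d.getD "system_id" "")) with
      | none => exact PySem.Dict.nodup_keys_insert _ _ _ h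
      | some cur =>
        by_cases hle : cur.1 ≤ d.getD "system_id" ""
        · simp only [hle, if_true]; exact PySem.Dict.nodup_keys_insert _ _ _ h
        · simpa [hle] using h

theorem pvInsertBy_cons {α : Type} (blt : α → α → Bool) (x y : α) (ys : List α) :
    PySem.List.insertBy blt x (y :: ys) =
      if blt x y then x :: y :: ys else y :: PySem.List.insertBy blt x ys := by
  rfl

theorem pvInsertBy_ne_nil {α : Type} (blt : α → α → Bool) (x : α) (ys : List α) :
    PySem.List.insertBy blt x ys ≠ [] := by
  cases ys with
  | nil => simp [PySem.List.insertBy]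
  | cons y t =>
    rw [pvInsertBy_cons]
    split <;> simp

theorem pvGetLast?_cons_ne_nil {α : Type} (a : α) (l : List α) (h : l ≠ []) :
    (a :: l).getLast? = l.getLast? := by
  cases l with
  | nil => exact absurd rfl h
  | cons b t => exact List.getLast?_cons_cons

theorem pvGetLast?_insertBy {α : Type} (blt : α → α → Bool) (x : α) (ys : List α)
    (h : ∃ y ∈ ys, blt x y = true) :
    (PySem.List.insertBy blt x ys).getLast? = ys.getLast? := by
  induction ys with
  | nil => simp at h
  | cons y t ih =>
    rw [pvInsertBy_cons]
    by_cases hb : blt x y = true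
    · rw [if_pos hb]
      exact List.getLast?_cons_cons
    · rw [if_neg hb]
      have ht : ∃ z ∈ t, blt x z = true := by
        obtain ⟨z, hz, hbz⟩ := h
        cases hz with
        | head => exact absurd hbz hb
        | tail _ hz' => exact ⟨z, hz', hbz⟩
      have htne : t ≠ [] := by
        obtain ⟨z, hz, _⟩ := ht
        exact List.ne_nil_of_mem hz
      rw [pvGetLast?_cons_ne_nil _ _ (pvInsertBy_ne_nil blt x t),
          pvGetLast?_cons_ne_nil _ _ htne, ih ht]

theorem pvFilter_insertBy {α κ : Type} [LinearOrder κ] (key : α → κ) (p : α → Bool) (x : α) (acc : List α)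
    (hs : acc.Pairwise (fun a b => key a ≤ key b)) :
    (PySem.List.insertBy (fun a b => decide (key a < key b)) x acc).filter p =
      if p x then PySem.List.insertBy (fun a b => decide (key a < key b)) x (acc.filter p) else acc.filter p := by
  induction acc with
  | nil =>
    simp only [PySem.List.insertBy, List.filter_nil]
    split <;> simp_all [List.filter]
  | cons y t ih =>
    have hy : ∀ z ∈ t, key y ≤ key z := (List.pairwise_cons.mp hs).1
    have ht : t.Pairwise (fun a b => key a ≤ key b) := (List.pairwise_cons.mp hs).2
    rw [pvInsertBy_cons]
    by_cases hb : key x < key y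
    · rw [if_pos (by simpa using hb)]
      have hxall : ∀ z ∈ (y :: t).filter p, (decide (key x < key z)) = true := by
        intro z hz
        have hz' := List.mem_of_mem_filter hz
        simp only [decide_eq_true_iff]
        cases hz' with
        | head => exact hb
        | tail _ hz'' => exact lt_of_lt_of_le hb (hy z hz'')
      by_cases hp : p x = true
      · rw [if_pos hp]
        cases hf : (y :: t).filter p with
        | nil => simp [hf, hp, PySem.List.insertBy]
        | cons w ws =>
          have hw : (decide (key x < key w)) = true := hxall w (by rw [hf]; exact List.mem_cons_self)
          rw [pvInsertBy_cons]
          rw [if_pos hw]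
          rw [List.filter_cons]
          rw [if_pos hp]
          rw [hf]
      · rw [if_neg hp]
        rw [List.filter_cons, if_neg hp]
    · rw [if_neg (by simpa using hb)]
      rw [List.filter_cons]
      by_cases hpy : p y = true
      · rw [if_pos hpy]
        rw [List.filter_cons, if_pos hpy, ih ht]
        by_cases hp : p x = true
        · rw [if_pos hp, if_pos hp, pvInsertBy_cons, if_neg (by simpa using hb)]
        · rw [if_neg hp, if_neg hp]
      · rw [if_neg hpy, List.filter_cons, if_neg hpy, ih ht]

theorem pvSorted_concat {α κ : Type} [LinearOrder κ] (xs : List α) (x : α) (key : α → κ) :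
    PySem.List.sorted (xs ++ [x]) key =
      PySem.List.insertBy (fun a b => decide (key a < key b)) x (PySem.List.sorted xs key) := by
  rw [PySem.List.sorted_eq_foldl_insertBy, PySem.List.sorted_eq_foldl_insertBy, List.foldl_append]
  rfl

theorem pvSorted_filter {α κ : Type} [LinearOrder κ] (xs : List α) (key : α → κ) (p : α → Bool) :
    (PySem.List.sorted xs key).filter p = PySem.List.sorted (xs.filter p) key := by
  induction xs using List.reverseRecOn with
  | nil => rfl
  | append_singleton xs x ih =>
    rw [pvSorted_concat, pvFilter_insertBy key p x _ (PySem.List.sorted_pairwise xs key),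
        List.filter_append]
    by_cases hp : p x = true
    · rw [if_pos hp, ih]
      have : List.filter p [x] = [x] := by simp [hp]
      rw [this, pvSorted_concat]
    · rw [if_neg hp, ih]
      have : List.filter p [x] = [] := by simp [hp]
      rw [this, List.append_nil]

theorem pvFoldl_last {α : Type} (l : List α) :
    l.foldl (fun (_ : Option α) d => some d) none = l.getLast? := by
  induction l using List.reverseRecOn with
  | nil => rfl
  | append_singleton t x ih => rw [List.foldl_append, List.getLast?_concat]; rfl

theorem pvCore (m : List (PySem.Dict String String)) :
    (m.foldl pvUpdAll none = none ↔ m = []) ∧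
    (∀ c, m.foldl pvUpdAll none = some c →
      c.2 ∈ m ∧ c.1 = pvRaw c.2 ∧ (∀ y ∈ m, pvRaw y ≤ c.1) ∧
      (PySem.List.sorted m pvRaw).getLast? = some c.2) := by
  induction m using List.reverseRecOn with
  | nil => exact ⟨by simp, fun c hc => by simp [List.foldl] at hc⟩
  | append_singleton t x ih =>
    rw [List.foldl_append]
    constructor
    · constructor
      · intro h; simp [pvUpdAll] at h
      · intro h; exact absurd h (by simp)
    · intro c hc
      cases ht : t.foldl pvUpdAll none with
      | none =>
        have ht' : t = [] := (ih.1).mp ht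
        subst ht'
        rw [ht] at hc
        simp only [List.foldl_cons, List.foldl_nil] at hc
        have hc' : c = (pvRaw x, x) := by
          simpa [pvUpdAll] using hc.symm
        subst hc'
        refine ⟨by simp, rfl, by simp, ?_⟩
        simp [PySem.List.sorted, PySem.List.insertBy]
      | some c0 =>
        obtain ⟨hmem, hraw, hbound, hlast⟩ := ih.2 c0 ht
        rw [ht] at hc
        simp only [List.foldl_cons, List.foldl_nil] at hc
        by_cases hle : c0.1 ≤ pvRaw x
        · have hc' : c = (pvRaw x, x) := by simpa [pvUpdAll, hle] using hc.symm
          subst hc'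
          refine ⟨by simp, rfl, ?_, ?_⟩
          · intro y hy
            rcases List.mem_append.mp hy with hy | hy
            · exact le_trans (hbound y hy) hle
            · simp at hy; subst hy; exact le_refl _
          · rw [pvSorted_concat]
            rw [PySem.List.insertBy_of_forall_not_before]
            · exact List.getLast?_concat
            · intro y hy
              have : y ∈ t := (PySem.List.mem_sorted t pvRaw false y).mp hy
              simp only [decide_eq_false_iff_not, not_lt]
              exact le_trans (hbound y this) hle
        · have hc' : c = c0 := by simpa [pvUpdAll, hle] using hc.symm
          subst hc'
          have hlt : pvRaw x < c.1 := lt_of_not_ge hle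
          refine ⟨List.mem_append_left _ hmem, hraw, ?_, ?_⟩
          · intro y hy
            rcases List.mem_append.mp hy with hy | hy
            · exact hbound y hy
            · simp at hy; subst hy; exact le_of_lt hlt
          · rw [pvSorted_concat, pvGetLast?_insertBy]
            · exact hlast
            · refine ⟨c.2, (PySem.List.mem_sorted t pvRaw false c.2).mpr hmem, ?_⟩
              simp only [decide_eq_true_iff]
              rw [← hraw]; exact hlt

theorem pvBestB_eq (rows : List (List (String × String))) :
    pvBestB rows = (rows.map (fun item => PySem.Dict.ofList item)).foldl pvStepB' PySem.Dict.empty := by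
  rw [pvBestB, List.foldl_map]
  rfl

theorem pvPointwise (rows : List (List (String × String))) (k : String) :
    (pvOutA rows).get? k = ((pvBestB rows).get? k).map (fun c => c.2) := by
  have hkey : (fun item : PySem.Dict String String => item.getD "system_id" "") = pvRaw := rfl
  by_cases hk : k = ""
  · subst hk
    rw [pvOutA, pvBestB_eq, pvA_get?_empty, pvB_get?_empty, PySem.Dict.get?_empty, PySem.Dict.get?_empty]
    rfl
  · rw [pvOutA, pvBestB_eq, pvA_get? _ _ _ hk, pvB_get? _ _ _ hk, PySem.Dict.get?_empty,
        PySem.Dict.get?_empty, hkey]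
    have hA : (PySem.List.sorted (rows.map (fun item => PySem.Dict.ofList item)) pvRaw).foldl
          (fun a d => if pvSid d = k then some d else a) none
        = ((PySem.List.sorted (rows.map (fun item => PySem.Dict.ofList item)) pvRaw).filter
            (fun d => decide (pvSid d = k))).foldl (fun (_ : Option _) d => some d) none := by
      rw [List.foldl_filter]
      exact (PySem.List.foldl_congr_mem _ _ _ _ (fun acc x _ => by
        by_cases h : pvSid x = k <;> simp [h])).symm
    have hB : (rows.map (fun item => PySem.Dict.ofList item)).foldl (pvUpd k) none
        = ((rows.map (fun item => PySem.Dict.ofList item)).filter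
            (fun d => decide (pvSid d = k))).foldl pvUpdAll none := by
      rw [List.foldl_filter]
      exact (PySem.List.foldl_congr_mem _ _ _ _ (fun acc x _ => by
        by_cases h : pvSid x = k <;> simp [pvUpd, h])).symm
    rw [hA, hB, pvSorted_filter, pvFoldl_last]
    cases hm : ((rows.map (fun item => PySem.Dict.ofList item)).filter
        (fun d => decide (pvSid d = k))).foldl pvUpdAll none with
    | none =>
      have := (pvCore _).1.mp hm
      rw [this]
      rfl
    | some c =>
      have hlast := ((pvCore _).2 c hm).2.2.2
      rw [hlast]
      rfl

theorem pvFinal (rows : List (List (String × String))) :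
    health_by_system_py rows = health_by_system_py_alt rows := by
  unfold health_by_system_py health_by_system_py_alt
  have hOA : (pvOutA rows).keys.Nodup := pvA_nodup _ _ PySem.Dict.nodup_keys_empty
  have hNB : (pvBestB rows).keys.Nodup := by
    rw [pvBestB_eq]; exact pvB_nodup _ _ PySem.Dict.nodup_keys_empty
  have hmem : ∀ k, k ∈ (pvOutA rows).keys ↔ k ∈ (pvBestB rows).keys := by
    intro k
    rw [← not_iff_not, ← PySem.Dict.get?_eq_none_iff_not_mem_keys,
        ← PySem.Dict.get?_eq_none_iff_not_mem_keys, pvPointwise]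
    cases (pvBestB rows).get? k <;> simp
  have hperm : (pvOutA rows).keys.Perm (pvBestB rows).keys :=
    (List.perm_ext_iff_of_nodup hOA hNB).mpr hmem
  have hsort : PySem.List.sorted (pvOutA rows).keys (fun key => key)
      = PySem.List.sorted (pvBestB rows).keys (fun sid => sid) :=
    PySem.List.sorted_eq_sorted_of_perm _ _ _ (fun _ _ h => h) hperm
  rw [hsort]
  apply List.map_congr_left
  intro k hkmem
  have hkB : k ∈ (pvBestB rows).keys := (PySem.List.mem_sorted _ _ _ k).mp hkmem
  have hBneq : (pvBestB rows).get? k ≠ none := by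
    intro hnone
    exact (PySem.Dict.get?_eq_none_iff_not_mem_keys _ _).mp hnone hkB
  obtain ⟨c, hc⟩ := Option.ne_none_iff_exists'.mp hBneq
  have hAk := pvPointwise rows k
  rw [hc] at hAk
  simp only [Option.map_some] at hAk
  rw [PySem.Dict.getD_eq_get?_getD, PySem.Dict.getD_eq_get?_getD, hc, hAk]
  rfl

-- ===== VERDICT (by name: the statement is the Claim_ definition above) =====
theorem health_by_system_py_spec : Claim_equal_health_by_system_py := by
  intro rows _
  unfold Spec_health_by_system_py
  exact pvFinal rows
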